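-- pv_equiv track=rewrite | github.com/NgaLe02/PYTHON_PTIT | Danh_Sach/DanhSach/DoiCoSo2.py | solve
-- ===== SOURCE A (Python) =====
-- s = "0123456789ABCDEF"
--
-- def base4(x):
--     num = ''
--     for i in range(0, len(x), 2):
--         tmp = 0
--         if x[i] == '1':
--             tmp += 2
--         if x[i + 1] == '1':
--             tmp += 1
--         num = num + str(tmp)
--     return num
--
-- def base8(x):
--     num = ''
--     for i in range(0, len(x), 3):
--         tmp = 0
--         if x[i] == '1':
--             tmp += 4
--         if x[i + 1] == '1':
--             tmp += 2
--         if x[i + 2] == '1':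
--             tmp += 1
--         num = num + str(tmp)
--     return num
--
-- def base16(x):
--     num = ''
--     for i in range(0, len(x), 4):
--         tmp = 0
--         if x[i] == '1':
--             tmp += 8
--         if x[i + 1] == '1':
--             tmp += 4
--         if x[i + 2] == '1':
--             tmp += 2
--         if x[i + 3] == '1':
--             tmp += 1
--         num = num + s[tmp]
--     return num
--
-- def solve(x, b):
--     if b == 2:
--         return x
--     if b == 4: l = 2
--     elif b == 8: l = 3
--     elif b == 16: l = 4
--
--     while len(x) % l != 0:
--         x = '0' + x
--     if b == 4:
--         return base4(x)
--     if b == 8: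
--         return base8(x)
--     if b == 16:
--         return base16(x)
-- ===== SOURCE B (Python) =====
-- def solve(x, b):
--     if b == 2:
--         return x
--     if b == 4: l = 2
--     elif b == 8: l = 3
--     elif b == 16: l = 4
--     v = 0
--     for c in x:
--         v = v * 2 + (c == '1')
--     k = (len(x) + l - 1) // l
--     digits = "0123456789ABCDEF"
--     out = []
--     for _ in range(k):
--         out.append(digits[v % b])
--         v //= b
--     return ''.join(reversed(out))
-- ===== Notes on version B (the rewrite author's own statement) =====
-- stated objective: alternative
-- what changed: Instead of padding the string and mapping fixed-size bit groups to digits with three unrolled helpers, B folds the whole string into one integer (v = v*2 + (c=='1')) and then emits ceil(len/l) base-b digits by repeated divmod, building the output back-to-front.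
import Mathlib
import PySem

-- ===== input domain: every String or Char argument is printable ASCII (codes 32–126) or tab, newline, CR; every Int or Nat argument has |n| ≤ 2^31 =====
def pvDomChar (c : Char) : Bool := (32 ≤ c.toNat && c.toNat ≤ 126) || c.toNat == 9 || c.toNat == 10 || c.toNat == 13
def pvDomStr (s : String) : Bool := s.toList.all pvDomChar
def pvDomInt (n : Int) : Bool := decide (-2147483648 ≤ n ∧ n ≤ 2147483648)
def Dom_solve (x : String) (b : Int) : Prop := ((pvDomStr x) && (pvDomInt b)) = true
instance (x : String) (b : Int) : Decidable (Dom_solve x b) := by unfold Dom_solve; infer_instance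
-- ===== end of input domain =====

-- B replaces A's pad-and-chunk scheme (three unrolled per-base helpers) by whole-number
-- conversion: fold the bit string into one integer, then emit digits by repeated divmod;
-- objective: alternative algorithm of similar cost.

-- arithmetic of A's padding loop, cited by padLoop's decreasing_by
theorem pad_key (l n : Nat) (hl : 0 < l) (hr : n % l ≠ 0) :
    (l - (n + 1) % l) % l + 1 = (l - n % l) % l := by
  have hlt : n % l < l := Nat.mod_lt _ hl
  have h1l : 1 < l := by omega
  have h1 : (n + 1) % l = (n % l + 1) % l := by
    rw [Nat.add_mod, Nat.mod_eq_of_lt h1l]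
  rcases Nat.lt_or_ge (n % l + 1) l with hc | hc
  · have e1 : (l - (n % l + 1)) % l = l - (n % l + 1) := Nat.mod_eq_of_lt (by omega)
    have e2 : (l - n % l) % l = l - n % l := Nat.mod_eq_of_lt (by omega)
    rw [h1, Nat.mod_eq_of_lt hc, e1, e2]
    omega
  · have he : n % l + 1 = l := by omega
    have e2 : (l - n % l) % l = l - n % l := Nat.mod_eq_of_lt (by omega)
    rw [h1, he, Nat.mod_self, Nat.sub_zero, Nat.mod_self, e2]
    omega

-- ===== PORT A =====
-- module constant s = "0123456789ABCDEF"
def pyS : String := "0123456789ABCDEF"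

-- the while-loop 'while len(x) % l != 0: x = "0" + x' (the 0 < l guard is only for totality)
def padLoop (l : Nat) (cs : List Char) : List Char :=
  if h : 0 < l ∧ cs.length % l ≠ 0 then padLoop l ('0' :: cs) else cs
termination_by (l - cs.length % l) % l
decreasing_by
  rcases h with ⟨hl, hr⟩
  have key := pad_key l cs.length hl hr
  simp only [List.length_cons]
  omega

-- base4: loop over range(0, len, 2); num = num + str(tmp)
def base4 (cs : List Char) : List Char :=
  match cs with
  | a :: b :: rest =>
      (PySem.Int.toStr ((if a = '1' then 2 else 0) + (if b = '1' then 1 else 0))).toList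
        ++ base4 rest
  | _ => []   -- [] ends the loop; a lone trailing char is unreachable after padding

def base8 (cs : List Char) : List Char :=
  match cs with
  | a :: b :: c :: rest =>
      (PySem.Int.toStr ((if a = '1' then 4 else 0) + (if b = '1' then 2 else 0)
        + (if c = '1' then 1 else 0))).toList ++ base8 rest
  | _ => []

def base16 (cs : List Char) : List Char :=
  match cs with
  | a :: b :: c :: d :: rest =>
      ((PySem.Str.pyGet? pyS ((if a = '1' then 8 else 0) + (if b = '1' then 4 else 0)
        + (if c = '1' then 2 else 0) + (if d = '1' then 1 else 0))).getD '0')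
        :: base16 rest     -- the index is 0..15, always in range of s
  | _ => []

def solve (x : String) (b : Int) : String :=
  if b = 2 then x
  else if b = 4 then String.mk (base4 (padLoop 2 x.toList))
  else if b = 8 then String.mk (base8 (padLoop 3 x.toList))
  else if b = 16 then String.mk (base16 (padLoop 4 x.toList))
  else ""   -- Python raises UnboundLocalError here; excluded by Pre_solve

-- ===== PORT B =====
def bDigits : List Char := "0123456789ABCDEF".toList

-- v = v*2 + (c == '1'), folded over the whole string (v stays a nonnegative int)
def binVal (cs : List Char) : Nat :=
  cs.foldl (fun v c => v * 2 + (if c = '1' then 1 else 0)) 0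

-- the 'for _ in range(k): out.append(digits[v % b]); v //= b' loop, least-significant first
-- (digits[v % b] is always in range since v % b < b ≤ 16, so List.getD is exact)
def digLoop (k v base : Nat) : List Char :=
  match k with
  | 0 => []
  | k + 1 => bDigits.getD (v % base) '0' :: digLoop k (v / base) base

def solve_alt (x : String) (b : Int) : String :=
  if b = 2 then x
  else
    let l : Nat := if b = 4 then 2 else if b = 8 then 3 else if b = 16 then 4 else 0
    if l = 0 then ""   -- Python raises UnboundLocalError here; excluded by Pre_solve
    else
      let v := binVal x.toList
      let k := (x.toList.length + l - 1) / l
      String.mk (digLoop k v b.toNat).reverse   -- ''.join(reversed(out)); b.toNat = b here (b > 0)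

-- ===== PRECONDITION & SPEC =====
-- A raises UnboundLocalError (and so does B) for any base other than 2, 4, 8, 16.
def Pre_solve (x : String) (b : Int) : Prop := b = 2 ∨ b = 4 ∨ b = 8 ∨ b = 16
instance (x : String) (b : Int) : Decidable (Pre_solve x b) := by unfold Pre_solve; infer_instance
def pvWitness_solve : String × Int := ("10111", 4)

def Spec_solve (x : String) (b : Int) (out : String) : Prop := out = solve_alt x b
instance (x : String) (b : Int) (out : String) : Decidable (Spec_solve x b out) := by unfold Spec_solve; infer_instance

-- ===== CLAIM (what is proved, stated in full; the proofs are below) =====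
def Claim_equal_solve : Prop := ∀ (x : String) (b : Int), Dom_solve x b → Pre_solve x b → Spec_solve x b (solve x b)

-- ===== LEMMAS AND PROOFS =====

-- proof-side bridge: A's three helpers as one generic chunk pass
def chunks (l : Nat) (cs : List Char) : List Char :=
  if h : cs = [] ∨ l = 0 then []
  else bDigits.getD (binVal (cs.take l)) '0' :: chunks l (cs.drop l)
termination_by cs.length
decreasing_by
  rcases cs with _ | ⟨c, cs'⟩
  · exact absurd rfl (by tauto)
  · have : l ≠ 0 := by tauto
    simp
    omega

theorem chunks_cons (l : Nat) (hl : l ≠ 0) (c : Char) (cs : List Char) :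
    chunks l (c :: cs)
      = bDigits.getD (binVal ((c :: cs).take l)) '0' :: chunks l ((c :: cs).drop l) := by
  rw [chunks]
  simp [hl]

-- A's while-loop pad in closed form
theorem padLoop_eq (l : Nat) (cs : List Char) :
    padLoop l cs = List.replicate ((l - cs.length % l) % l) '0' ++ cs := by
  fun_induction padLoop l cs with
  | case1 cs h ih =>
    obtain ⟨hl, hr⟩ := h
    rw [ih]
    simp only [List.length_cons]
    rw [← pad_key _ _ hl hr, List.replicate_succ', List.append_assoc]
    rfl
  | case2 cs h =>
    have h0 : (l - cs.length % l) % l = 0 := by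
      rcases Nat.eq_zero_or_pos l with h0 | hp
      · simp [h0]
      · have : cs.length % l = 0 := by
          by_contra hne; exact h ⟨hp, hne⟩
        simp [this]
    simp [h0]

theorem base4_eq (cs : List Char) (h : cs.length % 2 = 0) : base4 cs = chunks 2 cs := by
  fun_induction base4 cs with
  | case1 a b rest ih =>
    simp only [List.length_cons] at h
    have hr : rest.length % 2 = 0 := by omega
    rw [chunks_cons 2 (by norm_num), ih hr]
    simp only [List.take_succ_cons, List.take_zero, List.drop_succ_cons, List.drop_zero]
    by_cases h1 : a = '1' <;> by_cases h2 : b = '1' <;> simp [h1, h2, binVal, bDigits] <;> rfl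
  | case2 cs hm =>
    rcases cs with _ | ⟨a, _ | ⟨b, rest⟩⟩
    · rw [chunks]; simp
    · simp at h
    · exact absurd rfl (hm a b rest)

theorem base8_eq (cs : List Char) (h : cs.length % 3 = 0) : base8 cs = chunks 3 cs := by
  fun_induction base8 cs with
  | case1 a b c rest ih =>
    simp only [List.length_cons] at h
    have hr : rest.length % 3 = 0 := by omega
    rw [chunks_cons 3 (by norm_num), ih hr]
    simp only [List.take_succ_cons, List.take_zero, List.drop_succ_cons, List.drop_zero]
    by_cases h1 : a = '1' <;> by_cases h2 : b = '1' <;> by_cases h3 : c = '1' <;>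
      simp [h1, h2, h3, binVal, bDigits] <;> rfl
  | case2 cs hm =>
    rcases cs with _ | ⟨a, _ | ⟨b, _ | ⟨c, rest⟩⟩⟩
    · rw [chunks]; simp
    · simp at h
    · simp at h
    · exact absurd rfl (hm a b c rest)

theorem base16_eq (cs : List Char) (h : cs.length % 4 = 0) : base16 cs = chunks 4 cs := by
  fun_induction base16 cs with
  | case1 a b c d rest ih =>
    simp only [List.length_cons] at h
    have hr : rest.length % 4 = 0 := by omega
    rw [chunks_cons 4 (by norm_num), ih hr]
    simp only [List.take_succ_cons, List.take_zero, List.drop_succ_cons, List.drop_zero]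
    by_cases h1 : a = '1' <;> by_cases h2 : b = '1' <;> by_cases h3 : c = '1' <;>
      by_cases h4 : d = '1' <;> simp [h1, h2, h3, h4, binVal, bDigits, pyS]
  | case2 cs hm =>
    rcases cs with _ | ⟨a, _ | ⟨b, _ | ⟨c, _ | ⟨d, rest⟩⟩⟩⟩
    · rw [chunks]; simp
    · simp at h
    · simp at h
    · simp at h
    · exact absurd rfl (hm a b c d rest)

-- shifting lemma for the bit fold
theorem binVal_foldl_shift (cs : List Char) (v : Nat) :
    cs.foldl (fun v c => v * 2 + (if c = '1' then 1 else 0)) v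
      = v * 2 ^ cs.length + binVal cs := by
  induction cs generalizing v with
  | nil => simp [binVal]
  | cons c cs ih =>
    simp only [List.foldl_cons, List.length_cons, binVal]
    rw [ih, ih (0 * 2 + _)]
    ring

theorem binVal_append (a c : List Char) :
    binVal (a ++ c) = binVal a * 2 ^ c.length + binVal c := by
  unfold binVal
  rw [List.foldl_append, binVal_foldl_shift]
  rfl

theorem binVal_lt (cs : List Char) : binVal cs < 2 ^ cs.length := by
  induction cs using List.reverseRecOn with
  | nil => simp [binVal]
  | append_singleton cs c ih =>
    rw [binVal_append]
    have hb : binVal [c] ≤ 1 := by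
      simp only [binVal, List.foldl_cons, List.foldl_nil]
      split <;> omega
    simp only [List.length_append, List.length_cons, List.length_nil, Nat.zero_add, pow_succ]
    omega

theorem binVal_replicate_zero (p : Nat) : binVal (List.replicate p '0') = 0 := by
  induction p with
  | zero => rfl
  | succ p ih =>
    rw [List.replicate_succ]
    simpa [binVal] using ih

-- chunking distributes over an append at a chunk boundary
theorem chunks_append (l : Nat) (hl : 0 < l) (k : Nat) :
    ∀ (a c : List Char), a.length = l * k → chunks l (a ++ c) = chunks l a ++ chunks l c := by
  induction k with
  | zero =>
    intro a c ha
    have : a = [] := List.eq_nil_of_length_eq_zero (by omega)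
    subst this
    have h0 : chunks l [] = [] := by rw [chunks]; simp
    simp [h0]
  | succ k ih =>
    intro a c ha
    have hsum : l * k + l = l * (k + 1) := by ring
    rcases a with _ | ⟨x, a'⟩
    · simp at ha; omega
    · have hlen : (x :: a').length = l * (k + 1) := ha
      have hle : l ≤ (x :: a').length := by omega
      rw [show (x :: a') ++ c = x :: (a' ++ c) from rfl,
        chunks_cons l (by omega), chunks_cons l (by omega),
        show x :: (a' ++ c) = (x :: a') ++ c from rfl,
        List.take_append_of_le_length hle, List.drop_append_of_le_length hle,
        ih ((x :: a').drop l) c (by rw [List.length_drop]; omega)]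
      simp

-- the chunk digits of a length-(l*k) string are the k base-2^l digits of its value
theorem chunks_eq_digLoop (l : Nat) (hl : 0 < l) (k : Nat) :
    ∀ cs : List Char, cs.length = l * k →
      chunks l cs = (digLoop k (binVal cs) (2 ^ l)).reverse := by
  induction k with
  | zero =>
    intro cs h
    have : cs = [] := List.eq_nil_of_length_eq_zero (by omega)
    subst this
    rw [chunks]
    simp [digLoop]
  | succ k ih =>
    intro cs h
    have hsum : l * k + l = l * (k + 1) := by ring
    set front := cs.take (l * k) with hf
    set last := cs.drop (l * k) with hlast
    have hsplit : cs = front ++ last := (List.take_append_drop _ _).symm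
    have hfl : front.length = l * k := by
      rw [hf, List.length_take]; omega
    have hll : last.length = l := by
      rw [hlast, List.length_drop]; omega
    have hlast_ne : last ≠ [] := by
      intro hc; rw [hc] at hll; simp at hll; omega
    have hvlt : binVal last < 2 ^ l := by
      have := binVal_lt last; rwa [hll] at this
    have hv : binVal cs = binVal front * 2 ^ l + binVal last := by
      rw [hsplit, binVal_append, hll]
    have hmod : binVal cs % 2 ^ l = binVal last := by
      rw [hv, Nat.mul_add_mod', Nat.mod_eq_of_lt hvlt]
    have hdiv : binVal cs / 2 ^ l = binVal front := by
      rw [hv, Nat.mul_comm (binVal front), Nat.mul_add_div (by positivity),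
        Nat.div_eq_of_lt hvlt, Nat.add_zero]
    have hlast_chunk : chunks l last = [bDigits.getD (binVal last) '0'] := by
      rcases last with _ | ⟨c, cs'⟩
      · exact absurd rfl hlast_ne
      · rw [chunks_cons l (by omega)]
        have ht : (c :: cs').take l = c :: cs' := List.take_of_length_le (by omega)
        have hd : (c :: cs').drop l = [] := List.drop_eq_nil_of_le (by omega)
        rw [ht, hd, chunks]
        simp
    calc chunks l cs = chunks l front ++ chunks l last := by
          rw [hsplit] at *; exact chunks_append l hl k front last hfl
      _ = (digLoop k (binVal front) (2 ^ l)).reverse ++ [bDigits.getD (binVal last) '0'] := by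
          rw [ih front hfl, hlast_chunk]
      _ = (digLoop (k + 1) (binVal cs) (2 ^ l)).reverse := by
          rw [digLoop, hmod, hdiv]
          simp

-- ===== VERDICT (by name: the statement is the Claim_ definition above) =====
theorem solve_spec : Claim_equal_solve := by
  intro x b _ hpre
  unfold Spec_solve solve solve_alt
  set cs := x.toList with hcs
  set n := cs.length with hn
  rcases hpre with h | h | h | h <;> subst h <;> norm_num
  · -- b = 4, l = 2
    rw [padLoop_eq 2, base4_eq _ (by simp; omega),
      chunks_eq_digLoop 2 (by norm_num) ((n + 2 - 1) / 2) _
        (by simp; omega),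
      binVal_append, binVal_replicate_zero]
    norm_num
    rfl
  · -- b = 8, l = 3
    rw [padLoop_eq 3, base8_eq _ (by simp; omega),
      chunks_eq_digLoop 3 (by norm_num) ((n + 3 - 1) / 3) _
        (by simp; omega),
      binVal_append, binVal_replicate_zero]
    norm_num
    rfl
  · -- b = 16, l = 4
    rw [padLoop_eq 4, base16_eq _ (by simp; omega),
      chunks_eq_digLoop 4 (by norm_num) ((n + 4 - 1) / 4) _
        (by simp; omega),
      binVal_append, binVal_replicate_zero]
    norm_num
    rfl
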